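-- pv_equiv track=rewrite | github.com/Amrlxyz/tactictoe | calculation.py | boardToPosition
-- ===== SOURCE A (Python) =====
-- def boardToPosition(board_flat):
--     # - storing the position of each "tick" rather than value of each cell
--     # So each tick can be stored in 3 bits, but in total the whole board is 3 bytes for easier access
--
--     CELL_MAP = {
--         -3: 0,
--         -2: 1,
--         -1: 2,
--         1:  3,
--         2:  4,
--         3:  5,
--     }
--
--     location_arr = [0x0F for x in range(6)]
--     for i, cell in enumerate(board_flat):
--         if cell in CELL_MAP:
--             location_arr[CELL_MAP[cell]] = i
--
--     return location_arr
-- ===== SOURCE B (Python) =====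
-- def boardToPosition(board_flat):
--     # Per-target backward search: reverse the board once; for each of the six
--     # tick values the last occurrence is n - 1 - index in the reversed list,
--     # or 0x0F when the value is absent. No enumerate pass, no index map.
--     r = list(reversed(board_flat))
--     n = len(board_flat)
--     out = []
--     for v in (-3, -2, -1, 1, 2, 3):
--         out.append(n - 1 - r.index(v) if v in r else 0x0F)
--     return out
-- ===== Notes on version B (the rewrite author's own statement) =====
-- stated objective: alternative
-- what changed: Replaces A's single enumerate scan that conditionally overwrites a preallocated 6-slot array with six independent backward searches: reverse the board once and compute each tick's last position as n-1-reversed.index(v) (0x0F when absent).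
import Mathlib
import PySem

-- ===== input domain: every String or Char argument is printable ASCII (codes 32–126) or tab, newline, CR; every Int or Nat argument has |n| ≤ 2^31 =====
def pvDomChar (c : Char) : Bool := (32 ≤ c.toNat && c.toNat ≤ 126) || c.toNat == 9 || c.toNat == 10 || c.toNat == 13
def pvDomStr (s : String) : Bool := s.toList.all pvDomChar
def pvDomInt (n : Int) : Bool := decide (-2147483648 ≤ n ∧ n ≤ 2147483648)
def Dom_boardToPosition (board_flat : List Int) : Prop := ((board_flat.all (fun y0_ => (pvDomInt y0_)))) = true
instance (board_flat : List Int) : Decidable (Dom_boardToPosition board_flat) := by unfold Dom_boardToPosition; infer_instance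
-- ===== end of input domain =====

-- B replaces A's enumerate scan-and-overwrite of a preallocated 6-slot array by six
-- independent backward searches on the reversed board (objective: alternative, same cost).

-- ===== PORT A =====
-- A-side helper: the literal CELL_MAP dict
def pvCellMap : PySem.Dict Int Int :=
  PySem.Dict.ofList [(-3, 0), (-2, 1), (-1, 2), (1, 3), (2, 4), (3, 5)]

def boardToPosition (board_flat : List Int) : List Int :=
  -- location_arr = [0x0F for x in range(6)]
  let location_arr : List Int := (PySem.List.pyRange 0 6 1).map (fun _ => (0x0F : Int))
  -- for i, cell in enumerate(board_flat): if cell in CELL_MAP: location_arr[CELL_MAP[cell]] = i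
  -- (the index CELL_MAP[cell] is a literal 0..5, nonnegative and in range, so List.set is exact here)
  (PySem.List.enumerate board_flat).foldl
    (fun arr p =>
      if pvCellMap.contains p.2 then arr.set (pvCellMap.getD p.2 0).toNat p.1 else arr)
    location_arr

-- ===== PORT B =====
def boardToPosition_alt (board_flat : List Int) : List Int :=
  -- r = list(reversed(board_flat)); n = len(board_flat)
  let r := board_flat.reverse
  let n : Int := board_flat.length
  -- for v in (-3, -2, -1, 1, 2, 3): out.append(n - 1 - r.index(v) if v in r else 0x0F)
  -- (r.index(v) is guarded by 'v in r', so index? is some there and getD 0 is exact)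
  ([-3, -2, -1, 1, 2, 3] : List Int).map (fun v =>
    if r.contains v then n - 1 - ((PySem.List.index? r v).getD 0 : Int) else (0x0F : Int))

-- ===== PRECONDITION & SPEC =====
def Spec_boardToPosition (board_flat : List Int) (out : List Int) : Prop := out = boardToPosition_alt board_flat
instance (board_flat : List Int) (out : List Int) : Decidable (Spec_boardToPosition board_flat out) := by unfold Spec_boardToPosition; infer_instance

-- ===== CLAIM (what is proved, stated in full; the proofs are below) =====
def Claim_equal_boardToPosition : Prop := ∀ (board_flat : List Int), Dom_boardToPosition board_flat → Spec_boardToPosition board_flat (boardToPosition board_flat)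

-- ===== LEMMAS AND PROOFS =====

-- B's per-value result: last position of v in bs, or 0x0F if absent.
def pvG (bs : List Int) (v : Int) : Int :=
  if bs.reverse.contains v then (bs.length : Int) - 1 - ((PySem.List.index? bs.reverse v).getD 0 : Int)
  else 15

theorem pvG_snoc (bs : List Int) (c v : Int) :
    pvG (bs ++ [c]) v = if c = v then (bs.length : Int) else pvG bs v := by
  unfold pvG
  rw [List.reverse_append]
  simp only [List.reverse_singleton, List.singleton_append, List.length_append,
    List.length_singleton]
  by_cases h : c = v
  · subst h
    rw [PySem.List.index?_cons_self]
    simp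
  · rw [PySem.List.index?_cons_of_ne _ h]
    rcases hi : PySem.List.index? bs.reverse v with _ | i
    · have hv : v ∉ bs.reverse := (PySem.List.index?_eq_none_iff _ _).mp hi
      have hv' : v ∉ bs := fun e => hv (List.mem_reverse.mpr e)
      have hvc : ¬ v = c := fun e => h e.symm
      simp [h, hv, hvc]
    · have hs : (PySem.List.index? bs.reverse v).isSome := by rw [hi]; rfl
      have hv : v ∈ bs.reverse := (PySem.List.index?_isSome_iff _ _).mp hs
      have hv' : v ∈ bs := List.mem_reverse.mp hv
      simp [h, hv]
      ring

-- A's loop step applied to the six values of pvG bs equals the six values of pvG (bs ++ [c]).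
theorem pv_step (bs : List Int) (c : Int) :
    (if pvCellMap.contains c then
        ([pvG bs (-3), pvG bs (-2), pvG bs (-1), pvG bs 1, pvG bs 2, pvG bs 3]).set
          (pvCellMap.getD c 0).toNat (bs.length : Int)
      else
        [pvG bs (-3), pvG bs (-2), pvG bs (-1), pvG bs 1, pvG bs 2, pvG bs 3])
    = [pvG (bs ++ [c]) (-3), pvG (bs ++ [c]) (-2), pvG (bs ++ [c]) (-1),
       pvG (bs ++ [c]) 1, pvG (bs ++ [c]) 2, pvG (bs ++ [c]) 3] := by
  by_cases h1 : c = -3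
  · subst h1
    norm_num [show pvCellMap.contains (-3) = true from by decide,
      show pvCellMap.getD (-3) 0 = 0 from by decide, pvG_snoc]
  by_cases h2 : c = -2
  · subst h2
    norm_num [show pvCellMap.contains (-2) = true from by decide,
      show pvCellMap.getD (-2) 0 = 1 from by decide, pvG_snoc]
  by_cases h3 : c = -1
  · subst h3
    norm_num [show pvCellMap.contains (-1) = true from by decide,
      show pvCellMap.getD (-1) 0 = 2 from by decide, show Int.toNat 2 = 2 from rfl, pvG_snoc]
  by_cases h4 : c = 1
  · subst h4
    norm_num [show pvCellMap.contains 1 = true from by decide,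
      show pvCellMap.getD 1 0 = 3 from by decide, show Int.toNat 3 = 3 from rfl, pvG_snoc]
  by_cases h5 : c = 2
  · subst h5
    norm_num [show pvCellMap.contains 2 = true from by decide,
      show pvCellMap.getD 2 0 = 4 from by decide, show Int.toNat 4 = 4 from rfl, pvG_snoc]
  by_cases h6 : c = 3
  · subst h6
    norm_num [show pvCellMap.contains 3 = true from by decide,
      show pvCellMap.getD 3 0 = 5 from by decide, show Int.toNat 5 = 5 from rfl, pvG_snoc]
  · have hc : pvCellMap.contains c = false := by
      rw [PySem.Dict.contains_eq_decide_mem_keys,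
        show pvCellMap.keys = [-3, -2, -1, 1, 2, 3] from by decide]
      simp; omega
    simp only [hc, Bool.false_eq_true, if_false, pvG_snoc]
    norm_num [h1, h2, h3, h4, h5, h6]

-- A's whole loop produces the six pvG values.
theorem pv_loop (bs : List Int) :
    (PySem.List.enumerate bs).foldl
        (fun arr p => if pvCellMap.contains p.2 then arr.set (pvCellMap.getD p.2 0).toNat p.1 else arr)
        [15, 15, 15, 15, 15, 15]
    = [pvG bs (-3), pvG bs (-2), pvG bs (-1), pvG bs 1, pvG bs 2, pvG bs 3] := by
  induction bs using List.reverseRecOn with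
  | nil => simp [PySem.List.enumerate_nil, pvG]
  | append_singleton bs c ih =>
    rw [PySem.List.enumerate_append, List.foldl_append, ih]
    simp only [PySem.List.enumerate_cons, PySem.List.enumerate_nil, List.foldl_cons, List.foldl_nil, zero_add]
    exact pv_step bs c

-- ===== VERDICT (by name: the statement is the Claim_ definition above) =====
theorem boardToPosition_spec : Claim_equal_boardToPosition := by
  intro bs _
  show boardToPosition bs = boardToPosition_alt bs
  unfold boardToPosition boardToPosition_alt
  simp only [List.map_cons, List.map_nil]
  rw [show (PySem.List.pyRange 0 6 1).map (fun _ => (0x0F : Int)) = [15, 15, 15, 15, 15, 15] from by decide,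
    pv_loop]
  rfl
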